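-- pv_equiv track=rewrite | github.com/jang9205/Programmers_Algorithm | LEVEL1/과일 장수.py | solution
-- ===== SOURCE A (Python) =====
-- def solution(k, m, score):
--     answer = 0
--     score = sorted(score)
--     for i in range(len(score) // m):
--         temp = 0
--         for k in range(m):
--             temp = score.pop() * m
--         answer += temp
--     return answer
-- ===== SOURCE B (Python) =====
-- def solution(k, m, score):
--     s = sorted(score)
--     return sum(s[len(s) - (i + 1) * m] * m for i in range(len(s) // m))
-- ===== Notes on version B (the rewrite author's own statement) =====
-- stated objective: simpler
-- what changed: A sorts then runs a nested loop that destructively pops the list m times per group, keeping only the last pop; B sorts once and sums the group minima directly with one strided indexed generator (no mutation, no inner loop, no discarded pops).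
import Mathlib
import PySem

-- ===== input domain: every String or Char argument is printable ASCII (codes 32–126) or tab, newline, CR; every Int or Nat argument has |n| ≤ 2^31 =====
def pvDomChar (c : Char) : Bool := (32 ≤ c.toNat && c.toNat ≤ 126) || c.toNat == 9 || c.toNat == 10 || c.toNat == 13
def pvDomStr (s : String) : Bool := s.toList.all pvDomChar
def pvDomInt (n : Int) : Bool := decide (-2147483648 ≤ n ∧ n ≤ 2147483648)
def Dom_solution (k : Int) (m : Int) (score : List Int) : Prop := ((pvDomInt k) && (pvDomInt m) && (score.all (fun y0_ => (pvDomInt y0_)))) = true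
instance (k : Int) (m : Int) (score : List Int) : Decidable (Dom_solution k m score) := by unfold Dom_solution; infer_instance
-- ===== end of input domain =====

-- B replaces A's nested destructive pop loop by one strided indexed pass over the sorted list (simpler, no mutation).

-- ===== PORT A =====
-- one inner-loop step: 'temp = score.pop() * m'; the 'none' branch is Python's
-- IndexError on popping an empty list, never reached (the outer range pops at
-- most len(score)//m * m ≤ len(score) elements)
def popStep (m : Int) (st : List Int × Int) (_ : Int) : List Int × Int :=
  match PySem.List.pop? st.1 with
  | some (x, rest) => (rest, x * m)
  | none => st

def solution (k : Int) (m : Int) (score : List Int) : Int :=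
  let s := PySem.List.sorted score (fun x => x)
  ((PySem.List.pyRange 0 (PySem.Int.floordiv (s.length : Int) m) 1).foldl
    (fun (st : List Int × Int) _ =>
      let p := (PySem.List.pyRange 0 m 1).foldl (popStep m) (st.1, 0)
      (p.1, st.2 + p.2))
    (s, 0)).2

-- ===== PORT B =====
def solution_alt (k : Int) (m : Int) (score : List Int) : Int :=
  let s := PySem.List.sorted score (fun x => x)
  (PySem.List.pyRange 0 (PySem.Int.floordiv (s.length : Int) m) 1).foldl
    (fun acc i => acc + PySem.List.pyGetD s ((s.length : Int) - (i + 1) * m) 0 * m) 0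

-- ===== PRECONDITION & SPEC =====
-- Pre_ excludes exactly m = 0, on which both A and B raise ZeroDivisionError at 'len(score) // m'.
def Pre_solution (k : Int) (m : Int) (score : List Int) : Prop := m ≠ 0
instance (k : Int) (m : Int) (score : List Int) : Decidable (Pre_solution k m score) := by unfold Pre_solution; infer_instance
def pvWitness_solution : Int × Int × List Int := (4, 2, [1, 2, 3, 4])
def Spec_solution (k : Int) (m : Int) (score : List Int) (out : Int) : Prop := out = solution_alt k m score
instance (k : Int) (m : Int) (score : List Int) (out : Int) : Decidable (Spec_solution k m score out) := by unfold Spec_solution; infer_instance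

-- ===== CLAIM (what is proved, stated in full; the proofs are below) =====
def Claim_equal_solution : Prop := ∀ (k : Int) (m : Int) (score : List Int), Dom_solution k m score → Pre_solution k m score → Spec_solution k m score (solution k m score)

-- ===== LEMMAS AND PROOFS =====

-- popping (length of l) times from t removes the top l.length elements and leaves
-- temp = (element at index t.length - l.length) * m
lemma inner_fold (m : Int) : ∀ (l : List Int) (t : List Int) (temp0 : Int),
    0 < l.length → l.length ≤ t.length →
    l.foldl (popStep m) (t, temp0) =
      (t.take (t.length - l.length), t.getD (t.length - l.length) 0 * m) := by
  intro l
  induction l with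
  | nil => intro t temp0 h _; simp at h
  | cons a l ih =>
    intro t temp0 _ hle
    have ht : t ≠ [] := by intro h; subst h; simp at hle
    obtain ⟨t', x, rfl⟩ : ∃ t' x, t = t' ++ [x] :=
      ⟨t.dropLast, t.getLast ht, (List.dropLast_append_getLast ht).symm⟩
    have hpop : PySem.List.pop? (t' ++ [x]) = some (x, t') := PySem.List.pop?_last t' x
    have hstep : popStep m (t' ++ [x], temp0) a = (t', x * m) := by
      simp [popStep, hpop]
    rw [List.foldl_cons, hstep]
    rcases l with _ | ⟨b, l⟩
    · simp
    · have hlen : (b :: l).length ≤ t'.length := by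
        simp at hle; simpa using hle
      rw [ih t' (x * m) (by simp) hlen]
      have h1 : (t' ++ [x]).length - (a :: b :: l).length = t'.length - (b :: l).length := by
        simp
      have hidx : t'.length - (b :: l).length < t'.length := by
        have : 0 < (b :: l).length := by simp
        omega
      rw [h1, List.take_append_of_le_length (by omega),
          List.getD_eq_getElem?_getD, List.getD_eq_getElem?_getD,
          List.getElem?_append_left hidx]

-- the outer loop: after j of the N groups, the list is the sorted list with the
-- top j*m elements removed and the accumulator equals B's strided sum over the
-- first j groups
lemma outer_fold (m : Int) (hm : 0 < m) (s : List Int) (N : Nat)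
    (hN : N * m.toNat ≤ s.length) :
    ∀ j : Nat, j ≤ N →
    (PySem.List.pyRange 0 (j : Int) 1).foldl
      (fun (st : List Int × Int) _ =>
        (((PySem.List.pyRange 0 m 1).foldl (popStep m) (st.1, 0)).1,
         st.2 + ((PySem.List.pyRange 0 m 1).foldl (popStep m) (st.1, 0)).2)) (s, 0) =
    (s.take (s.length - j * m.toNat),
     (PySem.List.pyRange 0 (j : Int) 1).foldl
       (fun acc i => acc + PySem.List.pyGetD s ((s.length : Int) - (i + 1) * m) 0 * m) 0) := by
  intro j
  induction j with
  | zero => intro _; simp [PySem.List.pyRange_one_eq_nil]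
  | succ j ih =>
    intro hj
    have hjN : j ≤ N := by omega
    have hM : 0 < m.toNat := by omega
    have hjm : (j + 1) * m.toNat ≤ s.length := by
      calc (j + 1) * m.toNat ≤ N * m.toNat := Nat.mul_le_mul_right _ (by omega)
        _ ≤ s.length := hN
    have hjm' : j * m.toNat + m.toNat ≤ s.length := by
      have h := hjm; rw [Nat.add_mul, one_mul] at h; exact h
    have hrange : PySem.List.pyRange 0 ((j + 1 : Nat) : Int) 1
        = PySem.List.pyRange 0 (j : Int) 1 ++ [(j : Int)] := by
      rw [Nat.cast_add, Nat.cast_one]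
      exact PySem.List.pyRange_one_succ_right (by positivity)
    rw [hrange, List.foldl_append, List.foldl_append, ih hjN]
    have hlenr : (PySem.List.pyRange 0 m 1).length = m.toNat := by
      rw [PySem.List.length_pyRange_one]; norm_num
    have htlen : (s.take (s.length - j * m.toNat)).length = s.length - j * m.toNat := by
      rw [List.length_take]; omega
    have hinner := inner_fold m (PySem.List.pyRange 0 m 1)
      (s.take (s.length - j * m.toNat)) 0 (by rw [hlenr]; exact hM)
      (by rw [hlenr, htlen]; omega)
    rw [hlenr, htlen] at hinner
    simp only [List.foldl_cons, List.foldl_nil]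
    rw [hinner]
    have hidx : s.length - j * m.toNat - m.toNat = s.length - (j + 1) * m.toNat := by
      rw [Nat.add_mul, one_mul]; omega
    have hidxlt : s.length - (j + 1) * m.toNat < s.length - j * m.toNat := by
      rw [Nat.add_mul, one_mul]; omega
    simp only [Prod.mk.injEq]
    refine ⟨?_, ?_⟩
    · rw [hidx, List.take_take]
      congr 1
      omega
    · have hget : (s.take (s.length - j * m.toNat)).getD (s.length - (j + 1) * m.toNat) 0
          = s.getD (s.length - (j + 1) * m.toNat) 0 := by
        rw [List.getD_eq_getElem?_getD, List.getD_eq_getElem?_getD,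
            List.getElem?_take_of_lt hidxlt]
      have hpg : PySem.List.pyGetD s ((s.length : Int) - ((j : Int) + 1) * m) 0
          = s.getD (s.length - (j + 1) * m.toNat) 0 := by
        have hc : (s.length : Int) - ((j : Int) + 1) * m = ((s.length - (j + 1) * m.toNat : Nat) : Int) := by
          have hmm : m = (m.toNat : Int) := by omega
          have h2 : ((s.length - (j + 1) * m.toNat : Nat) : Int)
              = (s.length : Int) - ((j : Int) + 1) * (m.toNat : Int) := by
            push_cast [hjm]; ring
          rw [h2, ← hmm]
        rw [hc, PySem.List.pyGetD_natCast]
      rw [hidx, hget, hpg]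

-- Python's floor division of a nonnegative number by a negative one is ≤ 0
-- (so the outer range is empty for negative m)
lemma floordiv_nonpos_of_neg (L : Nat) (m : Int) (hm : m < 0) : PySem.Int.floordiv (L : Int) m ≤ 0 := by
  show Int.fdiv (L : Int) m ≤ 0
  rcases m with n | n
  · exact absurd hm (by simp [Int.ofNat_eq_natCast])
  · rcases L with _ | L
    · simp [Int.fdiv]
    · show Int.fdiv (Int.ofNat (L + 1)) (Int.negSucc n) ≤ 0
      simp only [Int.fdiv]
      exact (Int.negSucc_lt_zero _).le

-- ===== VERDICT (by name: the statement is the Claim_ definition above) =====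
theorem solution_spec : Claim_equal_solution := by
  intro k m score _ hm0
  unfold Spec_solution
  simp only [solution, solution_alt]
  generalize PySem.List.sorted score (fun x => x) = s
  rcases lt_or_gt_of_ne hm0 with hneg | hpos
  · rw [PySem.List.pyRange_one_eq_nil (floordiv_nonpos_of_neg s.length m hneg)]
    simp
  · have hmm : m = (m.toNat : Int) := by omega
    have hfl : PySem.Int.floordiv (s.length : Int) m = ((s.length / m.toNat : Nat) : Int) := by
      rw [hmm]; exact_mod_cast PySem.Int.floordiv_natCast s.length m.toNat
    have hN : (s.length / m.toNat) * m.toNat ≤ s.length := Nat.div_mul_le_self _ _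
    have hout := outer_fold m hpos s (s.length / m.toNat) hN (s.length / m.toNat) le_rfl
    rw [hfl, hout]
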